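-- pv_equiv track=rewrite | github.com/oxidane/tmuxomatic | windowgram/windowgram.py | Pattern_To_List
-- ===== SOURCE A (Python) =====
-- def Pattern_To_List(windowgramgroup_pattern):
--     windowgramgroup_list = []
--     first_linewithcol = []
--     for line in windowgramgroup_pattern.split("\n"):
--         if not line.strip(): first_linewithcol = []
--         else:
--             # Build list of lines according to starting column of character run
--             #       * Discard any out-of-bounds character runs (as defined by first line)
--             #       * Insert blank lines where no runs were found
--             def colsplit(line): # linewithcol
--                 linewithcol = [] # [ (line, col), ... ]
--                 for col, ch in enumerate(list(line)): # Never strip the line or this will fail: "1 2\n  2\n"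
--                     if ch == " " or ch == "\t" or not linewithcol:
--                         if not linewithcol or linewithcol[-1][0]: linewithcol.append(["", None])
--                     if ch != " " and ch != "\t":
--                         if linewithcol[-1][1] is None: linewithcol[-1][1] = col
--                         linewithcol[-1][0] += ch
--                 return linewithcol
--             linewithcol = colsplit(line)
--             # Refine list using first line as a guide.  This will insert columns that are missing and remove
--             # columns that do not match the title.  Each windowgram line must match the one before it, or it's
--             # dropped, so a user must take care in editing windowgramgroup_pattern objects or data disappears.
--             # TODO: Slightly more sophisticated matching that will compensate for unaligned windowgrams by
--             # snapping to the nearest column; this is just be an estimate, user error loss is still possible.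
--             if first_linewithcol:
--                 # Strip columns with unexpected positions
--                 drop = []
--                 for ix1, (_, col1) in enumerate(linewithcol):
--                     ix2 = [ ix2 for ix2, (_, col2) in enumerate(first_linewithcol) if col2 == col1 ]
--                     if not ix2: drop.append(ix1)
--                 for ix in reversed(drop): linewithcol.pop(ix)
--                 # Insert missing columns
--                 for ix1, (_, col1) in enumerate(first_linewithcol):
--                     if not [ (ix2, col2) for ix2, (_, col2) in enumerate(linewithcol) if col2 == col1 ]:
--                         linewithcol.insert( ix1, ["", col1] )
--             # First line expands the collation list
--             if not first_linewithcol: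
--                 first_linewithcol = linewithcol
--                 for n in range(len(first_linewithcol)): windowgramgroup_list.append([])
--             # Insert lines into the collation list
--             linewithcol = linewithcol[:len(first_linewithcol)] # Assure truncation
--             for n in range(len(first_linewithcol)):
--                 windowgramgroup_list[-(len(first_linewithcol)-n)].append(linewithcol[n][0])
--     # Return as list of windowgrams with blank lines removed
--     windowgramgroup_list = [ "\n".join([ l2 for l2 in l if l2 ])+"\n" for ix, l in enumerate(windowgramgroup_list) ]
--     return [ _ for _ in windowgramgroup_list if _ != "\n" ]
-- ===== SOURCE B (Python) =====
-- def Pattern_To_List(windowgramgroup_pattern):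
--     # Different algorithm: scan runs by index spans (no stateful char fold), and align
--     # each line to the template by a startcol->text dict lookup, which replaces the
--     # original's drop/insert/truncate refinement passes entirely.
--     def runs(line):
--         # [(text, startcol)] for each maximal run of non-space/tab characters
--         out, i, n = [], 0, len(line)
--         while i < n:
--             if line[i] == " " or line[i] == "\t":
--                 i += 1
--             else:
--                 j = i
--                 while j < n and line[j] != " " and line[j] != "\t":
--                     j += 1
--                 out.append((line[i:j], i))
--                 i = j
--         return out
--     result = []
--     lines = windowgramgroup_pattern.split("\n")
--     i = 0
--     while i < len(lines):
--         if not lines[i].strip():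
--             i += 1
--             continue
--         template = runs(lines[i])
--         cols = [[text] for text, _ in template]
--         i += 1
--         while i < len(lines) and lines[i].strip():
--             d = dict((c, t) for t, c in runs(lines[i]))
--             for k in range(len(template)):
--                 cols[k].append(d.get(template[k][1], ""))
--             i += 1
--         for c in cols:
--             s = "".join(t + "\n" for t in c if t)
--             if s:
--                 result.append(s)
--     return result
-- ===== Notes on version B (the rewrite author's own statement) =====
-- stated objective: faster
-- what changed: B replaces A's stateful per-character run accumulator and its quadratic drop/insert/truncate column-refinement passes with index-span run scanning and a per-line startcol->text dictionary: each block's first line fixes the template and every later cell is one dict lookup, columns being accumulated directly per block instead of appended into one global list via negative indexing.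
import Mathlib
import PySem

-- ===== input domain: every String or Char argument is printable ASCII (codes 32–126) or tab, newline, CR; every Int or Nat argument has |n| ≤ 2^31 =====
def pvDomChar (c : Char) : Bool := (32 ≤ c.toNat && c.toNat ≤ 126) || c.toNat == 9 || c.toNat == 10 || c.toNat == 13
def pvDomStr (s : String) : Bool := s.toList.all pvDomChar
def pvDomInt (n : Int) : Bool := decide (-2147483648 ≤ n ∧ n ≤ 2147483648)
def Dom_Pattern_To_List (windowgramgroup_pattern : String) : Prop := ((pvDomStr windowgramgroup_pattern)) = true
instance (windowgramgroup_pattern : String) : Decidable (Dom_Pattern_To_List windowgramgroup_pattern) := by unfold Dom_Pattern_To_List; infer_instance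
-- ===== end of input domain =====

-- B parses the same patterns with a different, measurably faster algorithm: index-span run
-- scanning and a per-line startcol→text dictionary lookup against the first line's template,
-- instead of A's stateful character fold and drop/insert/truncate column refinement.

-- ===== PORT A =====
-- colsplit inner loop: one character step of A's run accumulator
def pvColsplitStep (acc : List (String × Option Int)) (col : Int) (ch : Char) :
    List (String × Option Int) :=
  let acc1 :=
    if ch = ' ' ∨ ch = '\t' ∨ acc = [] then
      (if acc = [] ∨ (acc.getLastD ("", none)).1 ≠ "" then acc ++ [("", none)] else acc)
    else acc
  if ch ≠ ' ' ∧ ch ≠ '\t' then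
    -- linewithcol[-1][1] = col (if None); linewithcol[-1][0] += ch  (acc1 is nonempty here)
    acc1.dropLast ++ [((acc1.getLastD ("", none)).1.push ch,
      if (acc1.getLastD ("", none)).2 = none then some col else (acc1.getLastD ("", none)).2)]
  else acc1

def pvCStep (st : Int × List (String × Option Int)) (ch : Char) :
    Int × List (String × Option Int) :=
  (st.1 + 1, pvColsplitStep st.2 st.1 ch)

def pvColsplit (line : String) : List (String × Option Int) :=
  (line.toList.foldl pvCStep (0, [])).2

-- pop used by the drop loop ('linewithcol.pop(ix)'; the index is always in range in A)
def pvPopStep (l : List (String × Option Int)) (ix : Int) : List (String × Option Int) :=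
  match PySem.List.pop? l ix with
  | some r => r.2
  | none => l

-- drop runs at columns absent from the first line, then insert missing first-line columns
def pvRefine (lwc first : List (String × Option Int)) : List (String × Option Int) :=
  let drop : List Int := (PySem.List.enumerate lwc).foldl (fun d p =>
    if ((PySem.List.enumerate first).filter (fun q => q.2.2 == p.2.2)).isEmpty
    then d ++ [p.1] else d) []
  let lwc := drop.reverse.foldl pvPopStep lwc
  (PySem.List.enumerate first).foldl (fun l q =>
    if ((PySem.List.enumerate l).filter (fun p => p.2.2 == q.2.2)).isEmpty
    then PySem.List.insert l q.1 ("", q.2.2) else l) lwc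

-- one iteration of A's main loop; state = (windowgramgroup_list, first_linewithcol)
def pvStepA (st : List (List String) × List (String × Option Int)) (line : String) :
    List (List String) × List (String × Option Int) :=
  if PySem.Str.strip line = "" then (st.1, [])
  else
    let lwc0 := pvColsplit line
    let lwc1 := if st.2 = [] then lwc0 else pvRefine lwc0 st.2
    let first := if st.2 = [] then lwc1 else st.2
    let wl0 := if st.2 = [] then st.1 ++ List.replicate lwc1.length [] else st.1
    let lwc := lwc1.take first.length
    -- wlist[-(len(first)-n)]: the negative index equals len(wlist)-(len(first)-n), always in range here
    let wl := (List.range first.length).foldl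
      (fun w n => w.modify (w.length - (first.length - n))
        (fun l => l ++ [(lwc.getD n ("", none)).1])) wl0
    (wl, first)

def Pattern_To_List (windowgramgroup_pattern : String) : List String :=
  let st := ((PySem.Str.split? windowgramgroup_pattern "\n").getD []).foldl pvStepA ([], [])
  let wl := st.1.map (fun l => PySem.Str.join "\n" (l.filter (fun s => s ≠ "")) ++ "\n")
  wl.filter (fun s => s ≠ "\n")

-- ===== PORT B =====
-- inner 'while' condition: character belongs to a run
def pvNonSp (ch : Char) : Bool := !(ch == ' ' || ch == '\t')

-- runs(line): maximal non-space/tab spans with their starting column, by index scanning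
def pvRuns (cs : List Char) (i : Int) : List (String × Int) :=
  match cs with
  | [] => []
  | c :: rest =>
    if c = ' ' ∨ c = '\t' then pvRuns rest (i + 1)
    else
      (String.ofList ((c :: rest).takeWhile pvNonSp), i) ::
        pvRuns ((c :: rest).dropWhile pvNonSp) (i + ((c :: rest).takeWhile pvNonSp).length)
termination_by cs.length
decreasing_by
  · simp
  · have hc : pvNonSp c = true := by
      simp only [pvNonSp, Bool.not_eq_true']
      simp only [Bool.or_eq_false_iff, beq_eq_false_iff_ne]
      exact ⟨fun h => ‹¬(c = ' ' ∨ c = '\t')› (Or.inl h), fun h => ‹¬(c = ' ' ∨ c = '\t')› (Or.inr h)⟩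
    rw [List.dropWhile_cons_of_pos hc]
    have := List.length_dropWhile_le pvNonSp rest
    simp only [List.length_cons]
    omega

-- d = dict((c, t) for t, c in runs(line))
def pvDictOf (line : String) : PySem.Dict Int String :=
  (pvRuns line.toList 0).foldl (fun d p => d.insert p.2 p.1) PySem.Dict.empty

-- "".join(t + "\n" for t in c if t)
def pvJoinB (c : List String) : String :=
  PySem.Str.join "" ((c.filter (fun t => t ≠ "")).map (fun t => t ++ "\n"))

-- main loop over the split lines (outer while; blank lines skipped, a block consumed at once)
def pvMainB (lines : List String) : List String :=
  match lines with
  | [] => []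
  | l :: ls =>
    if PySem.Str.strip l = "" then pvMainB ls
    else
      let t := pvRuns l.toList 0
      let body := ls.takeWhile (fun x => !(PySem.Str.strip x == ""))
      let cols := body.foldl
        (fun cols x => List.zipWith (fun c p => c ++ [(pvDictOf x).getD p.2 ""]) cols t)
        (t.map (fun p => [p.1]))
      cols.foldl (fun res c => if pvJoinB c ≠ "" then res ++ [pvJoinB c] else res) []
        ++ pvMainB (ls.dropWhile (fun x => !(PySem.Str.strip x == "")))
termination_by lines.length
decreasing_by
  · simp
  · have := List.length_dropWhile_le (fun x => !(PySem.Str.strip x == "")) ls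
    simp only [List.length_cons]
    omega

def Pattern_To_List_alt (windowgramgroup_pattern : String) : List String :=
  pvMainB ((PySem.Str.split? windowgramgroup_pattern "\n").getD [])

-- ===== PRECONDITION & SPEC =====
def Spec_Pattern_To_List (windowgramgroup_pattern : String) (out : List String) : Prop := out = Pattern_To_List_alt windowgramgroup_pattern
instance (windowgramgroup_pattern : String) (out : List String) : Decidable (Spec_Pattern_To_List windowgramgroup_pattern out) := by unfold Spec_Pattern_To_List; infer_instance

-- ===== CLAIM (what is proved, stated in full; the proofs are below) =====
def Claim_equal_Pattern_To_List : Prop := ∀ (windowgramgroup_pattern : String), Dom_Pattern_To_List windowgramgroup_pattern → Spec_Pattern_To_List windowgramgroup_pattern (Pattern_To_List windowgramgroup_pattern)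

-- ===== LEMMAS AND PROOFS =====

-- text of column n of a row
def pvText (r : List (String × Option Int)) (n : Nat) : String := (r.getD n ("", none)).1

-- the rows of a block: the template line followed by each refined subsequent line
def pvRows (t : List (String × Option Int)) (rest : List String) :
    List (List (String × Option Int)) :=
  t :: rest.map (fun l => (pvRefine (pvColsplit l) t).take t.length)

-- the raw columns a block contributes to A's windowgramgroup_list
def pvColsR (t : List (String × Option Int)) (rows : List (List (String × Option Int))) :
    List (List String) :=
  (List.range t.length).map (fun n => rows.map (fun r => pvText r n))

def pvCols (b : List String) : List (List String) :=
  match b with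
  | [] => []
  | l0 :: rest => pvColsR (pvColsplit l0) (pvRows (pvColsplit l0) rest)

-- functional description of the block partition (cur = the open block)
def pvBlocksC (cur : List String) : List String → List (List String)
  | [] => if cur = [] then [] else [cur]
  | l :: ls =>
    if PySem.Str.strip l = "" then
      (if cur = [] then pvBlocksC [] ls else cur :: pvBlocksC [] ls)
    else pvBlocksC (cur ++ [l]) ls

-- A's join of one column, and A's per-block output
def pvAJoin (l : List String) : String :=
  PySem.Str.join "\n" (l.filter (fun s => s ≠ "")) ++ "\n"

def pvBlockOutA (b : List String) : List String :=
  ((pvCols b).map pvAJoin).filter (fun s => s ≠ "\n")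

-- B's per-block output (the body of pvMainB on one block l0 :: rest)
def pvBlockOutB (b : List String) : List String :=
  match b with
  | [] => []
  | l0 :: rest =>
    let t := pvRuns l0.toList 0
    let cols := rest.foldl
      (fun cols x => List.zipWith (fun c p => c ++ [(pvDictOf x).getD p.2 ""]) cols t)
      (t.map (fun p => [p.1]))
    cols.foldl (fun res c => if pvJoinB c ≠ "" then res ++ [pvJoinB c] else res) []

-- strict order on colsplit columns: ints increase, None sits at the end
def pvOlt : Option Int → Option Int → Prop :=
  fun a b =>
    match a, b with
    | some x, some y => x < y
    | some _, none => True
    | none, _ => False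

-- first run of r at column c, or ""
def pvFindText (r : List (String × Option Int)) (c : Option Int) : String :=
  match r.find? (fun p => p.2 == c) with
  | some p => p.1
  | none => ""

def pvMS (u : List (String × Int)) : List (String × Option Int) :=
  u.map (fun p => (p.1, some p.2))

def pvEndsSp (cs : List Char) : Bool :=
  match cs.getLast? with
  | some c => c == ' ' || c == '\t'
  | none => false

def pvTrail (cs : List Char) : List (String × Option Int) :=
  if pvEndsSp cs then [("", none)] else []

-- ---------- A-side: the main fold over lines (block decomposition) ----------

theorem pvColsplitStep_ne_nil (acc : List (String × Option Int)) (col : Int) (ch : Char) :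
    pvColsplitStep acc col ch ≠ [] := by
  unfold pvColsplitStep
  by_cases h2 : ch ≠ ' ' ∧ ch ≠ '\t'
  · simp [h2]
  · have h1 : ch = ' ' ∨ ch = '\t' ∨ acc = [] := by
      rcases not_and_or.mp h2 with h | h
      · exact Or.inl (not_not.mp h)
      · exact Or.inr (Or.inl (not_not.mp h))
    simp only [if_pos h1, if_neg h2]
    split_ifs with h3
    · simp
    · intro hc
      exact (not_or.mp h3).1 hc

theorem pvColsplit_fold_ne_nil (cs : List Char) (st : Int × List (String × Option Int))
    (h : st.2 ≠ []) : (cs.foldl pvCStep st).2 ≠ [] := by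
  induction cs generalizing st with
  | nil => exact h
  | cons c cs ih => exact ih _ (pvColsplitStep_ne_nil _ _ _)

theorem pvColsplit_ne_nil (line : String) (h : line ≠ "") : pvColsplit line ≠ [] := by
  have hl : line.toList ≠ [] := fun hc => h (String.toList_eq_nil_iff.mp hc)
  unfold pvColsplit
  cases hc : line.toList with
  | nil => exact absurd hc hl
  | cons c cs =>
    rw [List.foldl_cons]
    exact pvColsplit_fold_ne_nil cs _ (pvColsplitStep_ne_nil _ _ _)

theorem pvModify_append_cons {α : Type} (w cols : List α) (c : α) (f : α → α) :
    (w ++ c :: cols).modify w.length f = w ++ f c :: cols := by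
  induction w with
  | nil => simp [List.modify]
  | cons a w ih => simpa [List.modify] using ih

-- A's negative-index append loop on a list ending in `cols` rewrites exactly those entries
theorem pvFoldModify (cols : List (List String)) (k : Nat) (h : cols.length = k)
    (w : List (List String)) (f : Nat → List String → List String) :
    (List.range k).foldl (fun acc n => acc.modify (acc.length - (k - n)) (f n)) (w ++ cols)
      = w ++ (List.range k).map (fun n => f n (cols.getD n [])) := by
  induction cols generalizing k w f with
  | nil => subst h; simp
  | cons c cols ih =>
    subst h
    simp only [List.length_cons, List.range_succ_eq_map, List.foldl_cons, List.map_cons,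
      List.foldl_map, List.map_map]
    have h0 : (w ++ c :: cols).length - (cols.length + 1 - 0) = w.length := by
      simp
    rw [h0, pvModify_append_cons]
    have hrw : (w ++ f 0 c :: cols) = (w ++ [f 0 c]) ++ cols := by simp
    rw [hrw]
    have := ih cols.length rfl (w ++ [f 0 c]) (fun n => f (n + 1))
    simp only [Nat.succ_sub_succ] at this ⊢
    simp only [Function.comp_def, Nat.succ_eq_add_one]
    rw [this]
    simp

theorem pvStepA_blank (w : List (List String)) (t : List (String × Option Int)) (line : String)
    (h : PySem.Str.strip line = "") : pvStepA (w, t) line = (w, []) := by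
  simp [pvStepA, h]

theorem pvStepA_first (w : List (List String)) (l : String)
    (h : ¬ PySem.Str.strip l = "") :
    pvStepA (w, []) l = (w ++ pvColsR (pvColsplit l) [pvColsplit l], pvColsplit l) := by
  unfold pvStepA
  rw [if_neg h]
  simp only [↓reduceIte, List.take_length]
  rw [pvFoldModify (List.replicate (pvColsplit l).length []) (pvColsplit l).length
    List.length_replicate w]
  unfold pvColsR
  refine Prod.ext (congrArg (w ++ ·) (List.map_congr_left ?_)) rfl
  intro n hn
  rw [List.mem_range] at hn
  simp [pvText]

theorem pvStepA_next (w : List (List String)) (t : List (String × Option Int))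
    (rows : List (List (String × Option Int))) (l : String)
    (h : ¬ PySem.Str.strip l = "") (ht : t ≠ []) :
    pvStepA (w ++ pvColsR t rows, t) l
      = (w ++ pvColsR t (rows ++ [(pvRefine (pvColsplit l) t).take t.length]), t) := by
  unfold pvStepA
  rw [if_neg h]
  simp only [if_neg ht]
  have hlen : (pvColsR t rows).length = t.length := by
    simp [pvColsR]
  rw [pvFoldModify (pvColsR t rows) t.length hlen w]
  unfold pvColsR
  refine Prod.ext (congrArg (w ++ ·) (List.map_congr_left ?_)) rfl
  intro n hn
  rw [List.mem_range] at hn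
  rw [show ((List.range t.length).map (fun n => rows.map (fun r => pvText r n))).getD n []
      = rows.map (fun r => pvText r n) from PySem.List.getD_map_range _ _ _ _ hn]
  simp [pvText]

theorem pvStrip_ne_of_ne (l : String) (h : ¬ PySem.Str.strip l = "") : l ≠ "" := by
  intro hc; subst hc; exact h rfl

-- the main synchronisation: A's fold over the lines, described by the block partition
theorem pvFoldA (lines : List String) :
    (∀ w, ((lines.foldl pvStepA (w, [])).1 = w ++ (pvBlocksC [] lines).flatMap pvCols))
    ∧ (∀ w l0 rest, ¬ PySem.Str.strip l0 = "" →
        ((lines.foldl pvStepA (w ++ pvCols (l0 :: rest), pvColsplit l0)).1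
          = w ++ (pvBlocksC (l0 :: rest) lines).flatMap pvCols)) := by
  induction lines with
  | nil =>
    constructor
    · intro w; simp [pvBlocksC]
    · intro w l0 rest _; simp [pvBlocksC]
  | cons l ls ih =>
    constructor
    · intro w
      by_cases h : PySem.Str.strip l = ""
      · rw [List.foldl_cons, pvStepA_blank _ _ _ h, ih.1 w]
        simp [pvBlocksC, h]
      · rw [List.foldl_cons, pvStepA_first w l h]
        have := ih.2 w l [] h
        simp only [pvCols, pvRows, List.map_nil] at this
        rw [this]
        simp [pvBlocksC, h]
    · intro w l0 rest h0
      by_cases h : PySem.Str.strip l = ""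
      · rw [List.foldl_cons, pvStepA_blank _ _ _ h, ih.1 (w ++ pvCols (l0 :: rest))]
        simp [pvBlocksC, h, List.append_assoc]
      · have ht : pvColsplit l0 ≠ [] := pvColsplit_ne_nil l0 (pvStrip_ne_of_ne l0 h0)
        rw [List.foldl_cons]
        have hstep := pvStepA_next w (pvColsplit l0) (pvRows (pvColsplit l0) rest) l h ht
        simp only [pvCols] at hstep ⊢
        rw [hstep]
        have hrows : pvRows (pvColsplit l0) rest ++ [(pvRefine (pvColsplit l) (pvColsplit l0)).take (pvColsplit l0).length]
            = pvRows (pvColsplit l0) (rest ++ [l]) := by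
          simp [pvRows]
        rw [hrows]
        have := ih.2 w l0 (rest ++ [l]) h0
        simp only [pvCols] at this
        rw [this]
        simp [pvBlocksC, h]

theorem pvFlatA (bs : List (List String)) :
    ((bs.flatMap pvCols).map pvAJoin).filter (fun s => s ≠ "\n")
      = bs.flatMap pvBlockOutA := by
  induction bs with
  | nil => simp
  | cons b bs ih =>
    rw [List.flatMap_cons, List.map_append, List.filter_append, ih, List.flatMap_cons]
    rfl

-- ---------- colsplit = runs (+ trailing empty run) ----------

theorem pvRuns_nil (i : Int) : pvRuns [] i = [] := by rw [pvRuns.eq_def]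

theorem pvRuns_cons_sp {c : Char} {rest : List Char} {i : Int} (h : c = ' ' ∨ c = '\t') :
    pvRuns (c :: rest) i = pvRuns rest (i + 1) := by
  rw [pvRuns.eq_def]; simp only [if_pos h]

theorem pvRuns_cons_ns {c : Char} {rest : List Char} {i : Int} (h : ¬(c = ' ' ∨ c = '\t')) :
    pvRuns (c :: rest) i
      = (String.ofList ((c :: rest).takeWhile pvNonSp), i)
          :: pvRuns ((c :: rest).dropWhile pvNonSp)
              (i + ((c :: rest).takeWhile pvNonSp).length) := by
  rw [pvRuns.eq_def]; simp only [if_neg h]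

theorem pvNonSp_true {c : Char} (h : ¬(c = ' ' ∨ c = '\t')) : pvNonSp c = true := by
  simp only [pvNonSp, Bool.not_eq_true', Bool.or_eq_false_iff, beq_eq_false_iff_ne, ne_eq]
  exact ⟨fun h1 => h (Or.inl h1), fun h2 => h (Or.inr h2)⟩

theorem pvNonSp_false {c : Char} (h : c = ' ' ∨ c = '\t') : pvNonSp c = false := by
  rcases h with rfl | rfl <;> decide

theorem pvBeqSp_false {c : Char} (h : ¬(c = ' ' ∨ c = '\t')) : (c == ' ' || c == '\t') = false := by
  simp only [Bool.or_eq_false_iff, beq_eq_false_iff_ne, ne_eq]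
  exact ⟨fun h1 => h (Or.inl h1), fun h2 => h (Or.inr h2)⟩

theorem pvBeqSp_true {c : Char} (h : c = ' ' ∨ c = '\t') : (c == ' ' || c == '\t') = true := by
  rcases h with rfl | rfl <;> decide

theorem pvEndsSp_cons (c : Char) (cs : List Char) :
    pvEndsSp (c :: cs) = if cs = [] then (c == ' ' || c == '\t') else pvEndsSp cs := by
  cases cs with
  | nil => simp [pvEndsSp]
  | cons d ds => simp [pvEndsSp, List.getLast?_cons_cons]

theorem pvStepSpNone (pre : List (String × Option Int)) (i : Int) {ch : Char}
    (h : ch = ' ' ∨ ch = '\t') :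
    pvColsplitStep (pre ++ [("", none)]) i ch = pre ++ [("", none)] := by
  rcases h with rfl | rfl <;>
    simp [pvColsplitStep, List.getLastD_concat]

theorem pvStepSpSome (pre : List (String × Option Int)) (i : Int) {ch : Char} {t : String}
    {j : Int} (h : ch = ' ' ∨ ch = '\t') (ht : t ≠ "") :
    pvColsplitStep (pre ++ [(t, some j)]) i ch = pre ++ [(t, some j), ("", none)] := by
  rcases h with rfl | rfl <;>
    simp [pvColsplitStep, List.getLastD_concat, ht]

theorem pvStepNsNone (pre : List (String × Option Int)) (i : Int) {ch : Char}
    (h : ¬(ch = ' ' ∨ ch = '\t')) :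
    pvColsplitStep (pre ++ [("", none)]) i ch = pre ++ [(("" : String).push ch, some i)] := by
  have h2 : ch ≠ ' ' ∧ ch ≠ '\t' := ⟨fun h' => h (Or.inl h'), fun h' => h (Or.inr h')⟩
  simp [pvColsplitStep, h, h2, List.getLastD_concat, List.dropLast_concat]

theorem pvStepNsSome (pre : List (String × Option Int)) (i : Int) {ch : Char} {t : String}
    {j : Int} (h : ¬(ch = ' ' ∨ ch = '\t')) :
    pvColsplitStep (pre ++ [(t, some j)]) i ch = pre ++ [(t.push ch, some j)] := by
  have h2 : ch ≠ ' ' ∧ ch ≠ '\t' := ⟨fun h' => h (Or.inl h'), fun h' => h (Or.inr h')⟩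
  simp [pvColsplitStep, h, h2, List.getLastD_concat, List.dropLast_concat]

theorem pvPushNe (t : String) (c : Char) : t.push c ≠ "" := by
  intro hc
  have := congrArg String.toList hc
  simp [String.toList_push] at this

theorem pvMS_cons (p : String × Int) (u : List (String × Int)) :
    pvMS (p :: u) = (p.1, some p.2) :: pvMS u := rfl

theorem pvCL (cs : List Char) :
    (∀ (i : Int) (pre : List (String × Option Int)),
      (cs.foldl pvCStep (i, pre ++ [("", none)])).2
        = pre ++ pvMS (pvRuns cs i)
            ++ (if cs = [] ∨ pvEndsSp cs = true then [("", none)] else []))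
  ∧ (∀ (i : Int) (pre : List (String × Option Int)) (t : String) (j : Int), t ≠ "" →
      (cs.foldl pvCStep (i, pre ++ [(t, some j)])).2
        = pre ++ ((String.ofList (t.toList ++ cs.takeWhile pvNonSp), some j)
            :: (pvMS (pvRuns (cs.dropWhile pvNonSp)
                  (i + ((cs.takeWhile pvNonSp).length : Int))) ++ pvTrail cs))) := by
  induction cs with
  | nil =>
    constructor
    · intro i pre; simp [pvRuns_nil, pvMS]
    · intro i pre t j ht
      simp [pvRuns_nil, pvMS, pvTrail, pvEndsSp, String.ofList_toList]
  | cons c cs' ih =>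
    constructor
    · intro i pre
      by_cases h : c = ' ' ∨ c = '\t'
      · rw [List.foldl_cons]
        show (cs'.foldl pvCStep (i + 1, pvColsplitStep (pre ++ [("", none)]) i c)).2 = _
        rw [pvStepSpNone pre i h, ih.1 (i + 1) pre, pvRuns_cons_sp h]
        congr 1
        cases hcs : cs' with
        | nil => simp [hcs, pvEndsSp_cons, pvBeqSp_true h]
        | cons d ds => simp [pvEndsSp_cons, hcs]
      · rw [List.foldl_cons]
        show (cs'.foldl pvCStep (i + 1, pvColsplitStep (pre ++ [("", none)]) i c)).2 = _
        rw [pvStepNsNone pre i h, ih.2 (i + 1) pre _ i (pvPushNe "" c), pvRuns_cons_ns h]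
        rw [List.takeWhile_cons_of_pos (pvNonSp_true h),
          List.dropWhile_cons_of_pos (pvNonSp_true h)]
        simp only [pvMS_cons, String.toList_push]
        have hlen : i + 1 + ((cs'.takeWhile pvNonSp).length : Int)
            = i + (((c :: cs'.takeWhile pvNonSp)).length : Int) := by
          simp only [List.length_cons]; push_cast; ring
        rw [show (("" : String).toList = ([] : List Char)) from rfl]
        simp only [List.nil_append, hlen]
        have htr : pvTrail (c :: cs')
            = (if c :: cs' = [] ∨ pvEndsSp (c :: cs') = true then [(("" : String), (none : Option Int))] else []) := by
          simp [pvTrail]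
        rw [← htr]
        have htr2 : pvTrail cs' = pvTrail (c :: cs') := by
          cases hcs : cs' with
          | nil => simp [pvTrail, pvEndsSp_cons, pvEndsSp, pvBeqSp_false h]
          | cons d ds => simp [pvTrail, pvEndsSp_cons, hcs]
        rw [htr2]
        simp [List.append_assoc]
    · intro i pre t j ht
      by_cases h : c = ' ' ∨ c = '\t'
      · rw [List.foldl_cons]
        show (cs'.foldl pvCStep (i + 1, pvColsplitStep (pre ++ [(t, some j)]) i c)).2 = _
        rw [pvStepSpSome pre i h ht]
        have hre : pre ++ [(t, some j), ("", none)] = (pre ++ [(t, some j)]) ++ [("", none)] := by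
          simp
        rw [hre, ih.1 (i + 1) (pre ++ [(t, some j)])]
        rw [List.takeWhile_cons_of_neg (by simp [pvNonSp_false h]),
          List.dropWhile_cons_of_neg (by simp [pvNonSp_false h])]
        rw [pvRuns_cons_sp h]
        simp only [List.takeWhile_nil, List.length_nil, Nat.cast_zero, add_zero,
          List.append_nil, String.ofList_toList]
        have htr : (if cs' = [] ∨ pvEndsSp cs' = true then [(("" : String), (none : Option Int))] else [])
            = pvTrail (c :: cs') := by
          cases hcs : cs' with
          | nil => simp [pvTrail, pvEndsSp_cons, pvBeqSp_true h]
          | cons d ds => simp [pvTrail, pvEndsSp_cons, hcs]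
        rw [htr]
        simp [List.append_assoc]
      · rw [List.foldl_cons]
        show (cs'.foldl pvCStep (i + 1, pvColsplitStep (pre ++ [(t, some j)]) i c)).2 = _
        rw [pvStepNsSome pre i h, ih.2 (i + 1) pre _ j (pvPushNe t c)]
        rw [List.takeWhile_cons_of_pos (pvNonSp_true h),
          List.dropWhile_cons_of_pos (pvNonSp_true h)]
        simp only [String.toList_push]
        have hlen : i + 1 + ((cs'.takeWhile pvNonSp).length : Int)
            = i + (((c :: cs'.takeWhile pvNonSp)).length : Int) := by
          simp only [List.length_cons]; push_cast; ring
        rw [hlen]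
        have htr2 : pvTrail cs' = pvTrail (c :: cs') := by
          cases hcs : cs' with
          | nil => simp [pvTrail, pvEndsSp_cons, pvEndsSp, pvBeqSp_false h]
          | cons d ds => simp [pvTrail, pvEndsSp_cons, hcs]
        rw [htr2]
        simp [List.append_assoc]

theorem pvColsplit_eq (l : String) :
    pvColsplit l = pvMS (pvRuns l.toList 0) ++ pvTrail l.toList := by
  unfold pvColsplit
  cases hcs : l.toList with
  | nil => simp [pvRuns_nil, pvMS, pvTrail, pvEndsSp]
  | cons c cs' =>
    rw [List.foldl_cons]
    have hstep : pvCStep (0, ([] : List (String × Option Int))) c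
        = pvCStep (0, [(("" : String), (none : Option Int))]) c := by
      by_cases h : c = ' ' ∨ c = '\t'
      · simp only [pvCStep]
        rw [show [(("" : String), (none : Option Int))]
            = ([] : List (String × Option Int)) ++ [("", none)] from rfl,
          pvStepSpNone [] 0 h]
        rcases h with rfl | rfl <;> simp [pvColsplitStep]
      · simp only [pvCStep]
        rw [show [(("" : String), (none : Option Int))]
            = ([] : List (String × Option Int)) ++ [("", none)] from rfl,
          pvStepNsNone [] 0 h]
        have h2 : c ≠ ' ' ∧ c ≠ '\t' := ⟨fun h' => h (Or.inl h'), fun h' => h (Or.inr h')⟩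
        simp [pvColsplitStep, h, h2]
    rw [hstep, ← List.foldl_cons]
    have := (pvCL (c :: cs')).1 0 []
    rw [show ([(("" : String), (none : Option Int))])
        = ([] : List (String × Option Int)) ++ [("", none)] from rfl]
    rw [this]
    simp [pvTrail]

-- ---------- order facts ----------

theorem pvRuns_geAux (n : Nat) :
    ∀ (cs : List Char), cs.length ≤ n → ∀ (i : Int), ∀ p ∈ pvRuns cs i, i ≤ p.2 := by
  induction n with
  | zero =>
    intro cs hcs i
    have : cs = [] := List.eq_nil_of_length_eq_zero (Nat.le_zero.mp hcs)
    subst this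
    simp [pvRuns_nil]
  | succ n ih =>
  intro cs hcs i
  cases cs with
  | nil => simp [pvRuns_nil]
  | cons c rest =>
    by_cases h : c = ' ' ∨ c = '\t'
    · rw [pvRuns_cons_sp h]
      intro p hp
      have := ih rest (by simp only [List.length_cons] at hcs; omega) (i + 1) p hp
      omega
    · rw [pvRuns_cons_ns h]
      intro p hp
      rcases List.mem_cons.mp hp with rfl | hp
      · simp
      · have hle : ((c :: rest).dropWhile pvNonSp).length ≤ n := by
          rw [List.dropWhile_cons_of_pos (pvNonSp_true h)]
          have := List.length_dropWhile_le pvNonSp rest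
          simp only [List.length_cons] at hcs; omega
        have := ih _ hle _ p hp
        omega

theorem pvRuns_ge (cs : List Char) (i : Int) : ∀ p ∈ pvRuns cs i, i ≤ p.2 :=
  pvRuns_geAux cs.length cs le_rfl i

theorem pvRuns_chainAux (n : Nat) :
    ∀ (cs : List Char), cs.length ≤ n → ∀ (i : Int),
      ((pvRuns cs i).map (·.2)).Pairwise (· < ·) := by
  induction n with
  | zero =>
    intro cs hcs i
    have : cs = [] := List.eq_nil_of_length_eq_zero (Nat.le_zero.mp hcs)
    subst this
    simp [pvRuns_nil]
  | succ n ih =>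
  intro cs hcs i
  cases cs with
  | nil => simp [pvRuns_nil]
  | cons c rest =>
    by_cases h : c = ' ' ∨ c = '\t'
    · rw [pvRuns_cons_sp h]
      exact ih rest (by simp only [List.length_cons] at hcs; omega) (i + 1)
    · rw [pvRuns_cons_ns h]
      have hle : ((c :: rest).dropWhile pvNonSp).length ≤ n := by
        rw [List.dropWhile_cons_of_pos (pvNonSp_true h)]
        have := List.length_dropWhile_le pvNonSp rest
        simp only [List.length_cons] at hcs; omega
      have htw : 0 < ((c :: rest).takeWhile pvNonSp).length := by
        rw [List.takeWhile_cons_of_pos (pvNonSp_true h)]; simp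
      simp only [List.map_cons, List.pairwise_cons]
      constructor
      · intro x hx
        rcases List.mem_map.mp hx with ⟨p, hp, rfl⟩
        have := pvRuns_ge _ _ p hp
        omega
      · exact ih _ hle _

theorem pvRuns_chain (cs : List Char) (i : Int) :
    ((pvRuns cs i).map (·.2)).Pairwise (· < ·) :=
  pvRuns_chainAux cs.length cs le_rfl i

theorem pvChain_colsplit (l : String) : ((pvColsplit l).map (·.2)).Pairwise pvOlt := by
  rw [pvColsplit_eq]
  rw [List.map_append]
  apply List.pairwise_append.mpr
  refine ⟨?_, ?_, ?_⟩
  · have h1 : (pvMS (pvRuns l.toList 0)).map (·.2)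
        = ((pvRuns l.toList 0).map (·.2)).map some := by
      simp [pvMS, Function.comp_def]
    rw [h1]
    exact (pvRuns_chain l.toList 0).map some (fun a b hab => by simpa [pvOlt] using hab)
  · unfold pvTrail; split <;> simp
  · intro x hx y hy
    have hxs : ∃ z, x = some z := by
      rcases List.mem_map.mp hx with ⟨p, hp, rfl⟩
      simp only [pvMS, List.mem_map] at hp
      rcases hp with ⟨u, _, rfl⟩
      exact ⟨u.2, rfl⟩
    have hyn : y = none := by
      rcases List.mem_map.mp hy with ⟨q, hq, rfl⟩
      unfold pvTrail at hq
      split at hq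
      · simp only [List.mem_singleton] at hq
        rw [hq]
      · simp at hq
    rcases hxs with ⟨z, rfl⟩
    rw [hyn]
    trivial

theorem pvOlt_ne {a b : Option Int} (h : pvOlt a b) : a ≠ b := by
  cases a <;> cases b <;> simp [pvOlt] at h ⊢ <;> omega

theorem pvOlt_asymm {a b : Option Int} (h1 : pvOlt a b) (h2 : pvOlt b a) : False := by
  cases a <;> cases b <;> simp [pvOlt] at h1 h2 <;> omega

theorem pvChainSublist (bs : List (Option Int)) :
    ∀ as : List (Option Int), as.Pairwise pvOlt → bs.Pairwise pvOlt →
      (∀ a ∈ as, a ∈ bs) → as.Sublist bs := by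
  induction bs with
  | nil =>
    intro as _ _ hsub
    have : as = [] := by
      cases as with
      | nil => rfl
      | cons a as' => exact absurd (hsub a (List.mem_cons_self ..)) (by simp)
    simp [this]
  | cons b bs ih =>
    intro as ha hb hsub
    cases as with
    | nil => simp
    | cons a as' =>
      by_cases hab : a = b
      · subst hab
        apply List.cons_sublist_cons.mpr
        apply ih as' ha.of_cons hb.of_cons
        intro x hx
        have hxb : x ∈ a :: bs := hsub x (List.mem_cons_of_mem a hx)
        rcases List.mem_cons.mp hxb with rfl | hxbs
        · exact absurd rfl (pvOlt_ne ((List.pairwise_cons.mp ha).1 x hx))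
        · exact hxbs
      · have hmem : ∀ x ∈ a :: as', x ∈ bs := by
          intro x hx
          have hxb : x ∈ b :: bs := hsub x hx
          rcases List.mem_cons.mp hxb with rfl | hxbs
          · exfalso
            rcases List.mem_cons.mp hx with rfl | hxas
            · exact hab rfl
            · have h1 : pvOlt a x := (List.pairwise_cons.mp ha).1 x hxas
              have hax : a ∈ bs := by
                rcases List.mem_cons.mp (hsub a (List.mem_cons_self ..)) with rfl | h
                · exact absurd rfl hab
                · exact h
              have h2 : pvOlt x a := (List.pairwise_cons.mp hb).1 a hax
              exact pvOlt_asymm h1 h2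
          · exact hxbs
        exact (ih (a :: as') ha hb.of_cons hmem).cons b

-- ---------- refine = template lookup ----------

theorem pvEnumFilterEmpty {α : Type} (l : List α) (s : Int) (P : Int × α → Bool) (Q : α → Bool)
    (h : ∀ i x, P (i, x) = Q x) :
    ((PySem.List.enumerate l s).filter P).isEmpty = (l.filter Q).isEmpty := by
  induction l generalizing s with
  | nil => rfl
  | cons x xs ih =>
    rw [PySem.List.enumerate_cons, List.filter_cons, List.filter_cons, h s x]
    cases hQ : Q x
    · rw [if_neg (by simp), if_neg (by simp)]
      exact ih (s + 1)
    · rw [if_pos rfl, if_pos rfl]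
      simp

theorem pvInsert_at (pre suf : List (String × Option Int)) (v : String × Option Int) :
    PySem.List.insert (pre ++ suf) (pre.length : Int) v = pre ++ v :: suf := by
  unfold PySem.List.insert PySem.List.sliceIndices
  simp only []
  rw [if_neg (show ¬((pre.length : Int) < 0) by omega)]
  simp

theorem pvEraseAt {α : Type} (pre : List α) (x : α) (suf : List α) :
    (pre ++ x :: suf).eraseIdx pre.length = pre ++ suf := by
  induction pre with
  | nil => rfl
  | cons a pre ih => simpa [List.eraseIdx_cons_succ] using ih

theorem pvFP (l : List (String × Option Int)) :
    ∀ (pre : List (String × Option Int)) (P : (String × Option Int) → Bool),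
    ((((PySem.List.enumerate l (pre.length : Int)).filter (fun p => P p.2)).map (·.1)).reverse).foldl
        pvPopStep (pre ++ l)
      = pre ++ l.filter (fun p => !(P p)) := by
  induction l with
  | nil => intro pre P; simp [PySem.List.enumerate]
  | cons p rest ih =>
    intro pre P
    rw [PySem.List.enumerate_cons]
    simp only [List.filter_cons]
    have hcast : (pre.length : Int) + 1 = ((pre ++ [p]).length : Int) := by
      simp
    have hmain := ih (pre ++ [p]) P
    rw [List.append_assoc] at hmain
    simp only [List.singleton_append] at hmain
    cases hP : P p
    · rw [if_neg (show ¬(false = true) by simp), if_pos (show (!false) = true by simp),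
        hcast, hmain]
      simp
    · rw [if_pos (show (true = true) by rfl), if_neg (show ¬((!true) = true) by simp)]
      simp only [List.map_cons, List.reverse_cons, List.foldl_append]
      rw [hcast, hmain]
      simp only [List.foldl_cons, List.foldl_nil, List.append_assoc, List.singleton_append]
      have hpop : pvPopStep (pre ++ p :: rest.filter (fun p => !(P p))) (pre.length : Int)
          = pre ++ rest.filter (fun p => !(P p)) := by
        unfold pvPopStep
        have hlen : pre.length < (pre ++ p :: rest.filter (fun p => !(P p))).length := by
          simp
        rw [PySem.List.pop?_natCast _ pre.length hlen]
        have hget : (pre ++ p :: rest.filter (fun p => !(P p)))[pre.length] = p := by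
          rw [List.getElem_append_right (le_refl pre.length)]
          simp
        have herase : (pre ++ p :: rest.filter (fun p => !(P p))).eraseIdx pre.length
            = pre ++ rest.filter (fun p => !(P p)) := pvEraseAt pre p _
        rw [hget, herase]
      rw [hpop]

theorem pvFind_mem (r : List (String × Option Int)) (hnd : (r.map (·.2)).Nodup) :
    ∀ p ∈ r, pvFindText r p.2 = p.1 := by
  induction r with
  | nil => simp
  | cons q r' ih =>
    simp only [List.map_cons, List.nodup_cons] at hnd
    intro p hp
    rcases List.mem_cons.mp hp with rfl | hp'
    · simp [pvFindText, List.find?_cons]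
    · have hne : (q.2 == p.2) = false := by
        simp only [beq_eq_false_iff_ne, ne_eq]
        intro hc
        exact hnd.1 (hc ▸ List.mem_map.mpr ⟨p, hp', rfl⟩)
      unfold pvFindText
      rw [List.find?_cons_of_neg (by simp [hne])]
      exact ih hnd.2 p hp'

theorem pvFind_none (r : List (String × Option Int)) (c : Option Int)
    (h : ∀ p ∈ r, p.2 ≠ c) : pvFindText r c = "" := by
  unfold pvFindText
  rw [List.find?_eq_none.mpr (by intro x hx; simp [h x hx])]

theorem pvINS (ts : List (String × Option Int)) :
    ∀ (pref done rs r : List (String × Option Int)),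
    (((pref ++ ts).map (·.2)).Nodup) →
    (done.map (·.2) = pref.map (·.2)) →
    ((rs.map (·.2)).Sublist (ts.map (·.2))) →
    (∀ p ∈ rs, pvFindText r p.2 = p.1) →
    (∀ c ∈ ts.map (·.2), c ∉ rs.map (·.2) → pvFindText r c = "") →
    (PySem.List.enumerate ts (pref.length : Int)).foldl
      (fun l q => if ((PySem.List.enumerate l).filter (fun p => p.2.2 == q.2.2)).isEmpty
                  then PySem.List.insert l q.1 ("", q.2.2) else l) (done ++ rs)
    = done ++ ts.map (fun q => (pvFindText r q.2, q.2)) := by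
  induction ts with
  | nil =>
    intro pref done rs r _ _ hsub _ _
    have h1 : rs.map (·.2) = [] := List.sublist_nil.mp (by simpa using hsub)
    have h2 : rs = [] := by
      cases rs with
      | nil => rfl
      | cons a l => simp at h1
    subst h2
    rfl
  | cons q ts' ih =>
    intro pref done rs r hnd hdone hsub hfind hmiss
    rw [PySem.List.enumerate_cons, List.foldl_cons]
    have hlen_done : done.length = pref.length := by
      have := congrArg List.length hdone; simpa using this
    have hndq : (q.2 :: ts'.map (·.2)).Nodup := by
      have h := hnd
      rw [List.map_append, List.map_cons] at h
      exact h.of_append_right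
    have hcnotpref : q.2 ∉ pref.map (·.2) := by
      have h := hnd
      rw [List.map_append, List.map_cons] at h
      intro hc
      exact (List.nodup_append.mp h).2.2 q.2 hc q.2 (by simp) rfl
    have hdonef : ∀ p ∈ done, (p.2 == q.2) = false := by
      intro p hp
      simp only [beq_eq_false_iff_ne, ne_eq]
      intro hcc
      exact hcnotpref (hdone ▸ List.mem_map.mpr ⟨p, hp, hcc⟩)
    have hcast : (pref.length : Int) + 1 = ((pref ++ [q]).length : Int) := by
      simp
    have hnd' : (((pref ++ [q]) ++ ts').map (·.2)).Nodup := by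
      rw [List.append_assoc]
      simpa using hnd
    by_cases hc : q.2 ∈ rs.map (·.2)
    · cases rs with
      | nil => simp at hc
      | cons p0 rs' =>
        have hp0 : p0.2 = q.2 := by
          by_contra hne
          have hsub' : (p0.2 :: rs'.map (·.2)).Sublist (q.2 :: ts'.map (·.2)) := by
            simpa using hsub
          have h2 : (p0.2 :: rs'.map (·.2)).Sublist (ts'.map (·.2)) := by
            rcases List.sublist_cons_iff.mp hsub' with h | ⟨rr, heq, _⟩
            · exact h
            · exact absurd (by injection heq) hne
          have : q.2 ∈ ts'.map (·.2) := h2.subset hc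
          exact (List.nodup_cons.mp hndq).1 this
        have hfne : ((done ++ p0 :: rs').filter (fun p => p.2 == q.2)) ≠ [] := by
          apply List.ne_nil_of_mem (a := p0)
          exact List.mem_filter.mpr ⟨List.mem_append_right _ (List.mem_cons_self ..), by simp [hp0]⟩
        have hbranch : ((PySem.List.enumerate (done ++ p0 :: rs')).filter
            (fun p => p.2.2 == q.2)).isEmpty = false := by
          rw [pvEnumFilterEmpty (done ++ p0 :: rs') 0 _ (fun y => y.2 == q.2) (fun i x => rfl)]
          simp only [List.isEmpty_eq_false_iff]
          exact hfne
        rw [if_neg (by simp [hbranch])]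
        have hstate : done ++ p0 :: rs' = (done ++ [p0]) ++ rs' := by simp
        rw [hstate, hcast]
        have hrec := ih (pref ++ [q]) (done ++ [p0]) rs' r hnd'
          (by simp [hdone, hp0])
          (by
            have hsub' : (q.2 :: rs'.map (·.2)).Sublist (q.2 :: ts'.map (·.2)) := by
              have := hsub
              rw [List.map_cons, hp0] at this
              simpa using this
            exact List.cons_sublist_cons.mp hsub')
          (fun p hp => hfind p (List.mem_cons_of_mem _ hp))
          (by
            intro c' hc' hnotin
            refine hmiss c' (by simp [hc']) ?_
            simp only [List.map_cons, List.mem_cons]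
            rintro (h1 | h2)
            · exact (List.nodup_cons.mp hndq).1 (by rw [← hp0, ← h1]; exact hc')
            · exact hnotin h2)
        rw [hrec]
        have hval : p0 = (pvFindText r q.2, q.2) := by
          have h1 := hfind p0 (List.mem_cons_self ..)
          rw [← hp0, h1]
        rw [hval]
        simp
    · have hfe : ((done ++ rs).filter (fun p => p.2 == q.2)) = [] := by
        apply List.filter_eq_nil_iff.mpr
        intro p hp
        rcases List.mem_append.mp hp with h | h
        · simp [hdonef p h]
        · simp only [beq_eq_false_iff_ne, ne_eq, Bool.not_eq_true]
          intro hcc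
          exact hc (hcc ▸ List.mem_map.mpr ⟨p, h, rfl⟩)
      have hbranch : ((PySem.List.enumerate (done ++ rs)).filter
          (fun p => p.2.2 == q.2)).isEmpty = true := by
        rw [pvEnumFilterEmpty (done ++ rs) 0 _ (fun y => y.2 == q.2) (fun i x => rfl)]
        simp [hfe]
      rw [if_pos hbranch]
      have hidx : PySem.List.insert (done ++ rs) ((pref.length : Int)) ("", q.2)
          = done ++ ("", q.2) :: rs := by
        rw [← hlen_done]
        exact pvInsert_at done rs _
      rw [hidx]
      have hstate : done ++ ("", q.2) :: rs = (done ++ [("", q.2)]) ++ rs := by simp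
      rw [hstate, hcast]
      have hrec := ih (pref ++ [q]) (done ++ [("", q.2)]) rs r hnd'
        (by simp [hdone])
        (by
          rcases List.sublist_cons_iff.mp (show (rs.map (·.2)).Sublist (q.2 :: ts'.map (·.2)) by
            simpa using hsub) with h | ⟨rr, heq, _⟩
          · exact h
          · exfalso; apply hc; rw [heq]; simp)
        hfind
        (fun c' hc' hni => hmiss c' (by simp [hc']) hni)
      rw [hrec]
      have hval : ("", q.2) = (pvFindText r q.2, q.2) := by
        rw [hmiss q.2 (by simp) hc]
      rw [hval]
      simp

theorem pvRefine_eq (r t : List (String × Option Int))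
    (hr : (r.map (·.2)).Pairwise pvOlt) (ht : (t.map (·.2)).Pairwise pvOlt) :
    pvRefine r t = t.map (fun q => (pvFindText r q.2, q.2)) := by
  have hndr : (r.map (·.2)).Nodup := hr.imp pvOlt_ne
  have hndt : (t.map (·.2)).Nodup := ht.imp pvOlt_ne
  simp only [pvRefine]
  rw [PySem.List.foldl_append_if]
  simp only [List.nil_append]
  have hpred : (PySem.List.enumerate r).filter
        (fun p => ((PySem.List.enumerate t).filter (fun q => q.2.2 == p.2.2)).isEmpty)
      = (PySem.List.enumerate r).filter (fun p => ((t.filter (fun q => q.2 == p.2.2))).isEmpty) := by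
    apply List.filter_congr
    intro p _
    exact pvEnumFilterEmpty t 0 _ (fun y => y.2 == p.2.2) (fun i x => rfl)
  rw [hpred]
  have hfp := pvFP r [] (fun x => (t.filter (fun q => q.2 == x.2)).isEmpty)
  simp only [List.length_nil, Nat.cast_zero, List.nil_append] at hfp
  rw [hfp]
  set rs := r.filter (fun p => !((t.filter (fun q => q.2 == p.2)).isEmpty)) with hrs
  have hrs_sub : rs.Sublist r := List.filter_sublist
  have hsub : (rs.map (·.2)).Sublist (t.map (·.2)) := by
    apply pvChainSublist
    · exact List.Pairwise.sublist (hrs_sub.map (·.2)) hr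
    · exact ht
    · intro a ha
      rcases List.mem_map.mp ha with ⟨p, hp, rfl⟩
      have hkeep := (List.mem_filter.mp hp).2
      have hnem : t.filter (fun q => q.2 == p.2) ≠ [] := by
        intro h0
        rw [h0] at hkeep
        simp at hkeep
      rcases List.exists_mem_of_ne_nil _ hnem with ⟨qq, hqq⟩
      have := List.mem_filter.mp hqq
      exact List.mem_map.mpr ⟨qq, this.1, by simpa using this.2⟩
  have hfind : ∀ p ∈ rs, pvFindText r p.2 = p.1 :=
    fun p hp => pvFind_mem r hndr p (List.mem_of_mem_filter hp)
  have hmiss : ∀ c ∈ t.map (·.2), c ∉ rs.map (·.2) → pvFindText r c = "" := by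
    intro c hct hcn
    apply pvFind_none
    intro p hp hpc
    apply hcn
    apply List.mem_map.mpr
    refine ⟨p, List.mem_filter.mpr ⟨hp, ?_⟩, hpc⟩
    rcases List.mem_map.mp hct with ⟨qq, hqq, hqc⟩
    have hnem : qq ∈ t.filter (fun q => q.2 == p.2) :=
      List.mem_filter.mpr ⟨hqq, by simp [hqc, hpc]⟩
    simp only [Bool.not_eq_true']
    simp only [List.isEmpty_eq_false_iff]
    exact List.ne_nil_of_mem hnem
  have hins := pvINS t [] [] rs r (by simpa using hndt) rfl hsub hfind hmiss
  simp only [List.length_nil, Nat.cast_zero, List.nil_append] at hins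
  exact hins

-- ---------- per-block columns: A's columns as template lookups ----------

def pvColSpecA (t : List (String × Option Int)) (rest : List String) : List (List String) :=
  (List.range t.length).map (fun n =>
    (t.getD n ("", none)).1 :: rest.map (fun l => pvFindText (pvColsplit l) ((t.getD n ("", none)).2)))

theorem pvCols_eq (l0 : String) (rest : List String) :
    pvCols (l0 :: rest) = pvColSpecA (pvColsplit l0) rest := by
  unfold pvCols pvColsR pvRows pvColSpecA
  apply List.map_congr_left
  intro n hn
  rw [List.mem_range] at hn
  simp only [List.map_cons, List.map_map]
  congr 1
  apply List.map_congr_left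
  intro l _
  have href := pvRefine_eq (pvColsplit l) (pvColsplit l0) (pvChain_colsplit l) (pvChain_colsplit l0)
  simp only [Function.comp_def, href]
  have htake : ((pvColsplit l0).map (fun q => (pvFindText (pvColsplit l) q.2, q.2))).take (pvColsplit l0).length
      = (pvColsplit l0).map (fun q => (pvFindText (pvColsplit l) q.2, q.2)) := by
    rw [List.take_of_length_le (by simp)]
  rw [htake]
  unfold pvText
  rw [List.getD_eq_getElem _ _ (by simpa using hn), List.getD_eq_getElem _ _ hn, List.getElem_map]

theorem pvFindNone (l : String) : pvFindText (pvColsplit l) none = "" := by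
  rw [pvColsplit_eq]
  unfold pvFindText
  rw [List.find?_append]
  have h1 : (pvMS (pvRuns l.toList 0)).find? (fun p => p.2 == none) = none := by
    apply List.find?_eq_none.mpr
    intro x hx
    simp only [pvMS, List.mem_map] at hx
    rcases hx with ⟨u, _, rfl⟩
    simp
  rw [h1]
  unfold pvTrail
  by_cases hE : pvEndsSp l.toList
  · rw [if_pos hE]
    rfl
  · rw [if_neg hE]
    rfl

theorem pvFindMS (u : List (String × Int)) (c : Int) :
    (pvMS u).find? (fun p => p.2 == some c)
      = (u.find? (fun p => p.2 == c)).map (fun p => (p.1, some p.2)) := by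
  induction u with
  | nil => simp [pvMS]
  | cons p u' ih =>
    simp only [pvMS_cons]
    by_cases h : p.2 = c
    · rw [List.find?_cons_of_pos (by simp [h]), List.find?_cons_of_pos (by simp [h])]
      rfl
    · rw [List.find?_cons_of_neg (by simp [h]), List.find?_cons_of_neg (by simp [h])]
      exact ih

theorem pvRuns_nodup (l : String) : ((pvRuns l.toList 0).map (·.2)).Nodup := by
  exact (pvRuns_chain l.toList 0).imp (fun h => by omega)

theorem pvLookup (l : String) (c : Int) :
    (pvDictOf l).getD c "" = pvFindText (pvColsplit l) (some c) := by
  have hnd := pvRuns_nodup l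
  have hitems : (pvDictOf l).items = (pvRuns l.toList 0).map (fun p => (p.2, p.1)) := by
    unfold pvDictOf
    exact PySem.Dict.items_foldl_insert_fresh (pvRuns l.toList 0) (·.2) (·.1) PySem.Dict.empty
      (by intro a _; simp) hnd
  have hkeys : (pvDictOf l).keys = (pvRuns l.toList 0).map (·.2) := by
    simp only [PySem.Dict.keys, hitems, List.map_map]
    rfl
  rw [pvColsplit_eq]
  unfold pvFindText
  rw [List.find?_append, pvFindMS]
  cases hf : (pvRuns l.toList 0).find? (fun p => p.2 == c) with
  | some p0 =>
    have hmem : p0 ∈ pvRuns l.toList 0 := List.mem_of_find?_eq_some hf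
    have hp0c : p0.2 = c := by
      have := List.find?_some hf
      simpa using this
    have : (pvDictOf l).getD c "" = p0.1 := by
      apply PySem.Dict.getD_of_mem_items
      · rw [hitems]
        exact List.mem_map.mpr ⟨p0, hmem, by rw [hp0c]⟩
      · rw [hkeys]; exact hnd
    rw [this]
    simp
  | none =>
    have hniks : c ∉ (pvDictOf l).keys := by
      rw [hkeys]
      intro hc
      rcases List.mem_map.mp hc with ⟨p, hp, hpc⟩
      have := List.find?_eq_none.mp hf p hp
      simp [hpc] at this
    have hget : (pvDictOf l).get? c = none :=
      (PySem.Dict.get?_eq_none_iff_not_mem_keys _ _).mpr hniks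
    rw [PySem.Dict.getD_eq_get?_getD, hget]
    simp only [Option.getD_none]
    unfold pvTrail
    by_cases hE : pvEndsSp l.toList
    · rw [if_pos hE]
      rfl
    · rw [if_neg hE]
      rfl

-- ---------- joins ----------

theorem pvStrEq {s t : String} (h : s.toList = t.toList) : s = t := by
  rw [← String.ofList_toList (s := s), h, String.ofList_toList]

theorem pvToListAppend (s t : String) : (s ++ t).toList = s.toList ++ t.toList := by
  simp

theorem pvJoinEmptyList (parts : List String) :
    (PySem.Str.join "" parts).toList = (parts.map String.toList).flatten := by
  induction parts with
  | nil => simp [PySem.Str.toList_join, PySem.Chars.join_nil]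
  | cons x xs ih =>
    cases xs with
    | nil => simp [PySem.Str.toList_join, PySem.Chars.join_singleton]
    | cons y ys =>
      rw [PySem.Str.toList_join] at ih ⊢
      simp only [List.map_cons] at ih ⊢
      rw [PySem.Chars.join_cons_cons, List.flatten_cons, ← ih]
      simp [show ("" : String).toList = [] from rfl]

theorem pvJoinNlList (xs : List String) (h : xs ≠ []) :
    (PySem.Str.join "\n" xs).toList ++ ['\n'] = ((xs.map (· ++ "\n")).map String.toList).flatten := by
  induction xs with
  | nil => cases h rfl
  | cons x xs ih =>
    cases xs with
    | nil =>
      simp [PySem.Str.toList_join, PySem.Chars.join_singleton]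
    | cons y ys =>
      rw [PySem.Str.toList_join]
      simp only [List.map_cons]
      rw [PySem.Chars.join_cons_cons]
      have hih := ih (by simp)
      rw [PySem.Str.toList_join] at hih
      simp only [List.map_cons] at hih
      rw [List.flatten_cons, ← hih]
      have hnl : ("\n" : String).toList = ['\n'] := rfl
      simp [pvToListAppend, hnl, List.append_assoc]

theorem pvNlToList : ("\n" : String).toList = ['\n'] := rfl

theorem pvJoinAgree (c : List String) :
    ((pvAJoin c = "\n") ↔ (pvJoinB c = "")) ∧ (pvAJoin c ≠ "\n" → pvAJoin c = pvJoinB c) := by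
  unfold pvAJoin pvJoinB
  cases hxs : c.filter (fun s => s ≠ "") with
  | nil =>
    have hA : PySem.Str.join "\n" ([] : List String) ++ "\n" = "\n" := by
      apply pvStrEq
      rw [pvToListAppend, PySem.Str.toList_join]
      simp [PySem.Chars.join_nil]
    have hB : PySem.Str.join "" (([] : List String).map (· ++ "\n")) = "" := by
      apply pvStrEq
      rw [pvJoinEmptyList]
      simp [show ("" : String).toList = [] from rfl]
    refine ⟨?_, fun hne => absurd hA hne⟩
    rw [hA, hB]
    exact ⟨fun _ => rfl, fun _ => rfl⟩
  | cons x0 xs' =>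
    have hx0 : x0 ≠ "" := by
      have : x0 ∈ c.filter (fun s => s ≠ "") := by
        rw [hxs]
        exact List.mem_cons_self ..
      simpa using (List.mem_filter.mp this).2
    have hx0l : x0.toList ≠ [] := fun hc => hx0 (by
      rw [← String.ofList_toList (s := x0), hc])
    have hxlen : ∀ (this' : (((x0 :: xs').map (· ++ "\n")).map String.toList).flatten.length ≤ 1),
        False := by
      intro hlenle
      have hx : x0.toList.length + 1 ≤ (((x0 :: xs').map (· ++ "\n")).map String.toList).flatten.length := by
        simp only [List.map_cons, List.flatten_cons, List.length_append]
        have h2 : (x0 ++ "\n").toList.length = x0.toList.length + 1 := by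
          rw [pvToListAppend, pvNlToList]; simp
        omega
      have : x0.toList = [] := List.eq_nil_of_length_eq_zero (by omega)
      exact hx0l this
    have heq : PySem.Str.join "\n" (x0 :: xs') ++ "\n"
        = PySem.Str.join "" ((x0 :: xs').map (· ++ "\n")) := by
      apply pvStrEq
      rw [pvToListAppend, pvNlToList, pvJoinNlList _ (by simp), pvJoinEmptyList]
    have hne2 : PySem.Str.join "\n" (x0 :: xs') ++ "\n" ≠ "\n" := by
      intro hcontra
      have htl := congrArg String.toList hcontra
      rw [pvToListAppend, pvNlToList] at htl
      apply hxlen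
      rw [← pvJoinNlList _ (by simp), htl]
      simp
    have hne3 : PySem.Str.join "" ((x0 :: xs').map (· ++ "\n")) ≠ "" := by
      intro hcontra
      have htl := congrArg String.toList hcontra
      rw [pvJoinEmptyList] at htl
      apply hxlen
      rw [htl]
      simp
    exact ⟨⟨fun h => absurd h hne2, fun h => absurd h hne3⟩, fun _ => heq⟩

-- ---------- B's main loop = blocks ----------

theorem pvBlocksC_run (ls : List String) :
    ∀ cur, cur ≠ [] →
      pvBlocksC cur ls
        = (cur ++ ls.takeWhile (fun x => !(PySem.Str.strip x == "")))
            :: pvBlocksC [] (ls.dropWhile (fun x => !(PySem.Str.strip x == ""))) := by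
  induction ls with
  | nil => intro cur h; simp [pvBlocksC, h]
  | cons l ls ih =>
    intro cur h
    by_cases hb : PySem.Str.strip l = ""
    · rw [List.takeWhile_cons_of_neg (by simp [hb]), List.dropWhile_cons_of_neg (by simp [hb])]
      simp [pvBlocksC, hb, h]
    · rw [List.takeWhile_cons_of_pos (by simp [hb]), List.dropWhile_cons_of_pos (by simp [hb])]
      show pvBlocksC cur (l :: ls) = _
      have : pvBlocksC cur (l :: ls) = pvBlocksC (cur ++ [l]) ls := by
        simp [pvBlocksC, hb]
      rw [this, ih (cur ++ [l]) (by simp)]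
      simp

theorem pvMainB_nil : pvMainB [] = [] := by
  rw [pvMainB.eq_def]

theorem pvMainB_blank {l : String} {ls : List String} (h : PySem.Str.strip l = "") :
    pvMainB (l :: ls) = pvMainB ls := by
  rw [pvMainB.eq_def]
  simp only [if_pos h]

theorem pvMainB_block {l : String} {ls : List String} (h : ¬ PySem.Str.strip l = "") :
    pvMainB (l :: ls)
      = pvBlockOutB (l :: ls.takeWhile (fun x => !(PySem.Str.strip x == "")))
          ++ pvMainB (ls.dropWhile (fun x => !(PySem.Str.strip x == ""))) := by
  rw [pvMainB.eq_def]
  simp only [if_neg h]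
  rfl

theorem pvMainB_eqAux (n : Nat) : ∀ (ls : List String), ls.length ≤ n →
    pvMainB ls = (pvBlocksC [] ls).flatMap pvBlockOutB := by
  induction n with
  | zero =>
    intro ls hls
    have : ls = [] := List.eq_nil_of_length_eq_zero (Nat.le_zero.mp hls)
    subst this
    rw [pvMainB_nil]
    rfl
  | succ n ih =>
    intro ls hls
    cases ls with
    | nil => rw [pvMainB_nil]; rfl
    | cons l ls' =>
      simp only [List.length_cons] at hls
      by_cases hb : PySem.Str.strip l = ""
      · rw [pvMainB_blank hb, ih ls' (by omega)]
        simp [pvBlocksC, hb]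
      · rw [pvMainB_block hb]
        have hdl : (ls'.dropWhile (fun x => !(PySem.Str.strip x == ""))).length ≤ n := by
          have := List.length_dropWhile_le (fun x => !(PySem.Str.strip x == "")) ls'
          omega
        rw [ih _ hdl]
        have h1 : pvBlocksC [] (l :: ls') = pvBlocksC [l] ls' := by
          simp [pvBlocksC, hb]
        rw [h1, pvBlocksC_run ls' [l] (by simp), List.flatMap_cons]
        simp

theorem pvMainB_eq (lines : List String) :
    pvMainB lines = (pvBlocksC [] lines).flatMap pvBlockOutB :=
  pvMainB_eqAux lines.length lines le_rfl

-- ---------- per-block equality ----------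

theorem pvCB (body : List String) (t : List (String × Int)) :
    ∀ f : (String × Int) → List String,
    body.foldl (fun cols x => List.zipWith (fun c p => c ++ [(pvDictOf x).getD p.2 ""]) cols t)
        (t.map f)
      = t.map (fun p => f p ++ body.map (fun l => (pvDictOf l).getD p.2 "")) := by
  induction body with
  | nil => intro f; simp
  | cons x body' ih =>
    intro f
    rw [List.foldl_cons]
    have hz : List.zipWith (fun c p => c ++ [(pvDictOf x).getD p.2 ""]) (t.map f) t
        = t.map (fun p => f p ++ [(pvDictOf x).getD p.2 ""]) := by
      rw [List.zipWith_map_left, List.zipWith_self]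
    rw [hz, ih]
    apply List.map_congr_left
    intro p _
    simp

theorem pvMapRange {α β : Type} (u : List α) (f : α → β) (d : α) :
    (List.range u.length).map (fun n => f (u.getD n d)) = u.map f := by
  apply List.ext_getElem
  · simp
  · intro n h1 h2
    simp only [List.getElem_map, List.getElem_range]
    rw [List.getD_eq_getElem _ _ (by simpa using h1)]

theorem pvFilterMapJoin (L : List (List String)) :
    ((L.map pvAJoin).filter (fun s => s ≠ "\n")) = (L.filter (fun c => decide (pvJoinB c ≠ ""))).map pvJoinB := by
  induction L with
  | nil => rfl
  | cons c L ih =>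
    rw [List.map_cons, List.filter_cons, List.filter_cons]
    by_cases h : pvAJoin c = "\n"
    · have hb : pvJoinB c = "" := (pvJoinAgree c).1.mp h
      rw [if_neg (by simp [h]), if_neg (by simp [hb]), ih]
    · have hb : pvJoinB c ≠ "" := fun hc => h ((pvJoinAgree c).1.mpr hc)
      have heq : pvAJoin c = pvJoinB c := (pvJoinAgree c).2 h
      rw [if_pos (by simp [h]), if_pos (by simp [hb]), List.map_cons, ih, heq]

theorem pvColSpecA_split (l0 : String) (rest : List String) :
    pvColSpecA (pvMS (pvRuns l0.toList 0) ++ pvTrail l0.toList) rest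
      = (pvRuns l0.toList 0).map
          (fun p => p.1 :: rest.map (fun l => pvFindText (pvColsplit l) (some p.2)))
        ++ (if pvEndsSp l0.toList then [("" :: rest.map (fun _ => ""))] else []) := by
  set u := pvRuns l0.toList 0 with hu
  have hgetmain : ∀ n < u.length, ∀ (suf : List (String × Option Int)),
      (pvMS u ++ suf).getD n ("", none) = ((u.getD n ("", 0)).1, some (u.getD n ("", 0)).2) := by
    intro n hn suf
    have hn' : n < (pvMS u).length := by simpa [pvMS] using hn
    rw [List.getD_eq_getElem _ _ (by simp [pvMS]; omega), List.getElem_append_left hn']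
    simp only [pvMS, List.getElem_map]
    rw [List.getD_eq_getElem _ _ hn]
  by_cases h : pvEndsSp l0.toList
  · rw [show pvTrail l0.toList = [("", none)] from by simp [pvTrail, h]]
    unfold pvColSpecA
    have hlen : (pvMS u ++ [("", none)]).length = u.length + 1 := by simp [pvMS]
    rw [hlen, List.range_succ, List.map_append, if_pos h]
    congr 1
    · rw [← pvMapRange u
        (fun p => p.1 :: rest.map (fun l => pvFindText (pvColsplit l) (some p.2))) ("", 0)]
      apply List.map_congr_left
      intro n hn
      rw [List.mem_range] at hn
      rw [hgetmain n hn [("", none)]]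
    · simp only [List.map_cons, List.map_nil]
      have hget : (pvMS u ++ [("", none)]).getD u.length ("", none) = ("", none) := by
        have : (pvMS u).length = u.length := by simp [pvMS]
        rw [List.getD_eq_getElem _ _ (by simp [pvMS]), List.getElem_append_right (by omega)]
        simp [this]
      rw [hget]
      simp [pvFindNone]
  · rw [show pvTrail l0.toList = [] from by simp [pvTrail, h], if_neg h]
    unfold pvColSpecA
    simp only [List.append_nil]
    rw [show (pvMS u).length = u.length from by simp [pvMS]]
    rw [← pvMapRange u
      (fun p => p.1 :: rest.map (fun l => pvFindText (pvColsplit l) (some p.2))) ("", 0)]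
    apply List.map_congr_left
    intro n hn
    rw [List.mem_range] at hn
    have := hgetmain n hn []
    rw [List.append_nil] at this
    rw [this]

theorem pvBlock_eq (b : List String) : pvBlockOutA b = pvBlockOutB b := by
  cases b with
  | nil => rfl
  | cons l0 rest =>
    have hB : pvBlockOutB (l0 :: rest)
        = (((pvRuns l0.toList 0).map
            (fun p => [p.1] ++ rest.map (fun l => (pvDictOf l).getD p.2 ""))).filter
              (fun c => decide (pvJoinB c ≠ ""))).map pvJoinB := by
      simp only [pvBlockOutB]
      rw [pvCB rest (pvRuns l0.toList 0) (fun p => [p.1])]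
      rw [PySem.List.foldl_append_ite (p := fun c => pvJoinB c ≠ "") (f := pvJoinB)]
      rw [List.nil_append]
    rw [hB]
    unfold pvBlockOutA
    rw [pvCols_eq, pvColsplit_eq, pvColSpecA_split]
    rw [List.map_append, List.filter_append]
    have htrail : (((if pvEndsSp l0.toList then [("" :: rest.map (fun _ => ""))] else []).map
        pvAJoin).filter (fun s => s ≠ "\n")) = [] := by
      split
      · have hfilter : ("" :: rest.map (fun _ => "")).filter (fun s => s ≠ "") = [] := by
          apply List.filter_eq_nil_iff.mpr
          intro a ha
          rcases List.mem_cons.mp ha with rfl | ha'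
          · simp
          · rcases List.mem_map.mp ha' with ⟨_, _, rfl⟩
            simp
        have hjoin : pvAJoin ("" :: rest.map (fun _ => "")) = "\n" := by
          apply pvStrEq
          unfold pvAJoin
          rw [hfilter, pvToListAppend, PySem.Str.toList_join]
          simp [PySem.Chars.join_nil]
        rw [List.map_cons, List.map_nil, hjoin, List.filter_cons,
          if_neg (by simp)]
        rfl
      · simp
    rw [htrail, List.append_nil]
    rw [pvFilterMapJoin]
    have hcols : (pvRuns l0.toList 0).map
          (fun p => p.1 :: rest.map (fun l => pvFindText (pvColsplit l) (some p.2)))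
        = (pvRuns l0.toList 0).map
          (fun p => [p.1] ++ rest.map (fun l => (pvDictOf l).getD p.2 "")) := by
      apply List.map_congr_left
      intro p _
      simp [pvLookup]
    rw [hcols]

-- ===== VERDICT (by name: the statement is the Claim_ definition above) =====
theorem Pattern_To_List_spec : Claim_equal_Pattern_To_List := by
  intro p _
  show Pattern_To_List p = Pattern_To_List_alt p
  unfold Pattern_To_List Pattern_To_List_alt
  have hA := (pvFoldA ((PySem.Str.split? p "\n").getD [])).1 ([] : List (List String))
  simp only [hA, List.nil_append]
  rw [show (fun l => PySem.Str.join "\n" (List.filter (fun s => s ≠ "") l) ++ "\n") = pvAJoin from rfl]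
  rw [pvFlatA, pvMainB_eq]
  have : ∀ bs : List (List String), bs.flatMap pvBlockOutA = bs.flatMap pvBlockOutB := by
    intro bs
    induction bs with
    | nil => rfl
    | cons b bs ih => rw [List.flatMap_cons, List.flatMap_cons, ih, pvBlock_eq]
  exact this _
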